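-- pv_equiv track=rewrite | github.com/Ashley00/CS5140Project | util.py | name2dict
-- ===== SOURCE A (Python) =====
-- def name2dict(name_list, index):
-- 	name_dict = {}
-- 	count = index
--     # get key in dict
-- 	for i in name_list:
-- 		if i not in name_dict.keys():
-- 			name_dict[i] = count
-- 			count += 1
-- 	return name_dict
-- ===== SOURCE B (Python) =====
-- def name2dict(name_list, index):
--     return {x: index + len(set(name_list[:i]))
--             for i, x in enumerate(name_list)
--             if x not in name_list[:i]}
-- ===== Notes on version B (the rewrite author's own statement) =====
-- stated objective: alternative
-- what changed: Replaces the stateful loop (running counter plus membership dict) with a stateless per-position closed form: keep each first occurrence and compute its value as index plus the number of distinct items in the strict prefix.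
import Mathlib
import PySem

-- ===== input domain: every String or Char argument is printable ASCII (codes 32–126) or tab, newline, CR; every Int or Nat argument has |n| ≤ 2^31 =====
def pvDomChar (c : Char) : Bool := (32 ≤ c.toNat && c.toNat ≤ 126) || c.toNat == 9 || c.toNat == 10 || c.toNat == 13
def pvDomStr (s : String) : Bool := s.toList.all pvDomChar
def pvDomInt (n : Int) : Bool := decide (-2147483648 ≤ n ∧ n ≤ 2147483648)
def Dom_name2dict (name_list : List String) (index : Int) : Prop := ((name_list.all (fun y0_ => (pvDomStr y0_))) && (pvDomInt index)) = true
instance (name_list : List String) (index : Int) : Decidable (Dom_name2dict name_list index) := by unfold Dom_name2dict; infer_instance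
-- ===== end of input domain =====

-- B drops A's running counter and membership dict: each first occurrence independently gets index + (number of distinct items in its strict prefix), a stateless per-position formula (not faster; O(n^2)).


-- ===== PORT A =====
-- A's loop body: skip names already in the dict's keys, else assign the running count.
def stepA (st : PySem.Dict String Int × Int) (i : String) : PySem.Dict String Int × Int :=
  if (PySem.Dict.keys st.1).contains i then st else (st.1.insert i st.2, st.2 + 1)

def name2dict (name_list : List String) (index : Int) : List (String × Int) :=
  (name_list.foldl stepA (PySem.Dict.empty, index)).1.items

-- ===== PORT B =====
-- Source B's dict-comprehension body: for (i, x) in enumerate(name_list), skip unless x is a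
-- first occurrence (x not in name_list[:i]), else map x to index + len(set(name_list[:i])).
def stepB (name_list : List String) (index : Int) (d : PySem.Dict String Int) (q : Int × String) : PySem.Dict String Int :=
  if (PySem.List.slice name_list none (some q.1)).contains q.2 then d
  else d.insert q.2 (index + ((PySem.Set.ofList (PySem.List.slice name_list none (some q.1))).length : Int))

def name2dict_alt (name_list : List String) (index : Int) : List (String × Int) :=
  ((PySem.List.enumerate name_list).foldl (stepB name_list index) PySem.Dict.empty).items

-- ===== PRECONDITION & SPEC =====
def Spec_name2dict (name_list : List String) (index : Int) (out : List (String × Int)) : Prop := out = name2dict_alt name_list index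
instance (name_list : List String) (index : Int) (out : List (String × Int)) : Decidable (Spec_name2dict name_list index out) := by unfold Spec_name2dict; infer_instance

-- ===== CLAIM (what is proved, stated in full; the proofs are below) =====
def Claim_equal_name2dict : Prop := ∀ (name_list : List String) (index : Int), Dom_name2dict name_list index → Spec_name2dict name_list index (name2dict name_list index)

-- ===== LEMMAS AND PROOFS =====
-- numb c s = the pairs (s[0], c), (s[1], c+1), …  — the shape of both dicts' items over the seen list s.
def numb (c : Int) : List String → List (String × Int)
  | [] => []
  | x :: xs => (x, c) :: numb (c + 1) xs

lemma numb_fst : ∀ (s : List String) (c : Int), (numb c s).map Prod.fst = s := by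
  intro s; induction s with
  | nil => intro c; rfl
  | cons x xs ih => intro c; simp [numb, ih]

lemma numb_append : ∀ (s : List String) (c : Int) (x : String),
    numb c (s ++ [x]) = numb c s ++ [(x, c + s.length)] := by
  intro s; induction s with
  | nil => intro c x; simp [numb]
  | cons y ys ih => intro c x; simp [numb, ih]; ring

lemma anyfst : ∀ (l : List (String × Int)) (x : String),
    (l.any fun p => p.1 == x) = (l.map Prod.fst).contains x := by
  intro l; induction l with
  | nil => intro x; rfl
  | cons p ps ih =>
    intro x
    have hb : (p.1 == x) = (x == p.1) := by
      by_cases he : p.1 = x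
      · simp [he]
      · simp [he, Ne.symm he]
    simp only [List.any_cons, ih, List.map_cons, List.contains_cons, hb]

lemma dict_cond (s : List String) (c : Int) (x : String) :
    (PySem.Dict.keys (⟨numb c s⟩ : PySem.Dict String Int)).contains x = s.contains x := by
  simp [PySem.Dict.keys, numb_fst]

lemma add_eq (s : List String) (x : String) :
    PySem.Set.add s x = if s.contains x then s else s ++ [x] := rfl

-- inserting a fresh key into a numb-shaped dict appends the new pair
lemma insert_numb (s : List String) (c v : Int) (x : String) (h : s.contains x = false) :
    (⟨numb c s⟩ : PySem.Dict String Int).insert x v = ⟨numb c s ++ [(x, v)]⟩ := by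
  have hc : (⟨numb c s⟩ : PySem.Dict String Int).contains x = false := by
    simp only [PySem.Dict.contains, anyfst, numb_fst]; exact h
  simp [PySem.Dict.insert, hc]

lemma contains_ofList (p : List String) (x : String) :
    List.contains (PySem.Set.ofList p) x = p.contains x := by
  by_cases h : x ∈ p
  · simp [h, (PySem.Set.mem_ofList p x).mpr h]
  · have : x ∉ PySem.Set.ofList p := fun hx => h ((PySem.Set.mem_ofList p x).mp hx)
    simp [h, this]

lemma ofList_append_singleton (p : List String) (x : String) :
    PySem.Set.ofList (p ++ [x]) = PySem.Set.add (PySem.Set.ofList p) x := by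
  simp [PySem.Set.ofList_eq_foldl, List.foldl_append]

-- A-side invariant: the fold over (dict, count) tracks numb of the Set.add fold, count = start + #seen.
lemma loopA : ∀ (l s : List String) (c0 : Int),
    l.foldl stepA (⟨numb c0 s⟩, c0 + s.length) =
      (⟨numb c0 (l.foldl PySem.Set.add s)⟩, c0 + (l.foldl PySem.Set.add s).length) := by
  intro l; induction l with
  | nil => intro s c0; rfl
  | cons x xs ih =>
    intro s c0
    rw [List.foldl_cons, List.foldl_cons, add_eq]
    by_cases h : s.contains x
    · rw [show stepA (⟨numb c0 s⟩, c0 + s.length) x = (⟨numb c0 s⟩, c0 + s.length) by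
        simp only [stepA, dict_cond, h, if_true], if_pos h]
      exact ih s c0
    · rw [if_neg h]
      have hstep : stepA (⟨numb c0 s⟩, c0 + s.length) x =
          (⟨numb c0 (s ++ [x])⟩, c0 + (s ++ [x]).length) := by
        simp only [stepA, dict_cond, h, Bool.false_eq_true, if_false,
          insert_numb s c0 (c0 + s.length) x (Bool.eq_false_iff.mpr h),
          numb_append, List.length_append, List.length_cons, List.length_nil]
        rw [Prod.mk.injEq]
        exact ⟨rfl, by push_cast; ring⟩
      rw [hstep]
      exact ih (s ++ [x]) c0

-- B-side invariant: folding the comprehension body over the suffix l of name_list = p ++ l,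
-- starting from the dict numb-shaped over the distinct prefix items, extends it by Set.add.
lemma loopB (index : Int) : ∀ (l p : List String),
    (PySem.List.enumerate l (p.length : Int)).foldl (stepB (p ++ l) index)
        ⟨numb index (PySem.Set.ofList p)⟩ =
      ⟨numb index (l.foldl PySem.Set.add (PySem.Set.ofList p))⟩ := by
  intro l; induction l with
  | nil => intro p; rfl
  | cons x xs ih =>
    intro p
    rw [PySem.List.enumerate_cons, List.foldl_cons]
    have hsl : PySem.List.slice (p ++ x :: xs) none (some (p.length : Int)) = p := by
      rw [PySem.List.slice_to_natCast]; simp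
    have hs : stepB (p ++ x :: xs) index ⟨numb index (PySem.Set.ofList p)⟩ ((p.length : Int), x) =
        ⟨numb index (PySem.Set.add (PySem.Set.ofList p) x)⟩ := by
      rw [stepB, hsl]
      by_cases h : p.contains x
      · rw [if_pos h, add_eq]; simp only [contains_ofList, h, if_true]
      · rw [if_neg h, add_eq]
        simp only [contains_ofList, h, Bool.false_eq_true, if_false]
        rw [insert_numb _ _ _ _ (by rw [contains_ofList]; exact Bool.eq_false_iff.mpr h),
          numb_append]
    rw [hs, List.foldl_cons, ← ofList_append_singleton]
    have hlen : ((p ++ [x]).length : Int) = (p.length : Int) + 1 := by simp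
    rw [← hlen, show p ++ x :: xs = (p ++ [x]) ++ xs by simp]
    exact ih (p ++ [x])

-- ===== VERDICT (by name: the statement is the Claim_ definition above) =====
theorem name2dict_spec : Claim_equal_name2dict := by
  intro nl index _
  have hA := loopA nl [] index
  simp only [numb, List.length_nil, Nat.cast_zero, add_zero] at hA
  have hB := loopB index nl []
  simp only [List.nil_append, List.length_nil, Nat.cast_zero] at hB
  unfold Spec_name2dict name2dict name2dict_alt
  rw [show (PySem.Dict.empty : PySem.Dict String Int) = ({items := []} : PySem.Dict String Int) from rfl, hA]
  rw [show PySem.List.enumerate nl = PySem.List.enumerate nl 0 from rfl]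
  rw [show (⟨numb index (PySem.Set.ofList [])⟩ : PySem.Dict String Int) = ⟨[]⟩ from rfl] at hB
  rw [hB]
  rfl
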